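-- pv_equiv track=rewrite | github.com/yannickkiki/programming-training | leetcode/44_wildcard_matching.py | squash_stars
-- ===== SOURCE A (Python) =====
-- def squash_stars(pattern):
--     result = ""
--     is_prec_star = False
--     for c in pattern:
--         if is_prec_star and c=='*':
--             continue
--         result += c
--         is_prec_star = c=='*'
--     return result
-- ===== SOURCE B (Python) =====
-- from itertools import groupby
--
-- def squash_stars(pattern):
--     parts = []
--     for is_star, group in groupby(pattern, key=lambda c: c == '*'):
--         if is_star:
--             parts.append('*')
--         else:
--             parts.extend(group)
--     return ''.join(parts)
-- ===== Notes on version B (the rewrite author's own statement) =====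
-- stated objective: idiomatic
-- what changed: Replaces the manual previous-was-star boolean state machine with itertools.groupby run-grouping: each star run contributes one star character, non-star runs are copied whole, and the pieces are joined at the end.
import Mathlib
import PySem

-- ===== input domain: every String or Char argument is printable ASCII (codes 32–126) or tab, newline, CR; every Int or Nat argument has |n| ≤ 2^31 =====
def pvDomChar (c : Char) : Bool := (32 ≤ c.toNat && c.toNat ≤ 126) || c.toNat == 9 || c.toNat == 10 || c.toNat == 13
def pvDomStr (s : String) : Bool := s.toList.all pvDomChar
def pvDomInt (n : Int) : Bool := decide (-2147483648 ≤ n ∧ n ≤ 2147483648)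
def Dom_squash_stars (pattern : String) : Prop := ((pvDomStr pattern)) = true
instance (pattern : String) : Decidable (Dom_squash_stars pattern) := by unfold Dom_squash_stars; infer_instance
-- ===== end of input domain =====

-- B collapses star-runs by run-grouping (itertools.groupby style) instead of A's previous-was-star state machine; same output, more idiomatic.


-- ===== PORT A =====
-- A's loop: accumulator 'result' and boolean 'is_prec_star', char by char.
def squashStarsAux : List Char → List Char → Bool → List Char
  | [], result, _ => result
  | c :: rest, result, isPrecStar =>
    if isPrecStar && (c == '*') then
      squashStarsAux rest result isPrecStar
    else
      squashStarsAux rest (result ++ [c]) (c == '*')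

def squash_stars (pattern : String) : String :=
  String.mk (squashStarsAux pattern.toList [] false)

-- ===== PORT B =====
-- B's groupby: a star-run emits one '*' and the rest of the run is skipped; a non-star char is copied.
def squashGroups : List Char → List Char
  | [] => []
  | c :: rest =>
    if c == '*' then '*' :: squashGroups (rest.dropWhile (· == '*'))
    else c :: squashGroups rest
termination_by l => l.length
decreasing_by
  · have := List.length_dropWhile_le (p := (· == '*')) (l := rest); simpa using Nat.lt_succ_of_le this
  · simp

def squash_stars_alt (pattern : String) : String :=
  String.mk (squashGroups pattern.toList)

-- ===== PRECONDITION & SPEC =====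
def Spec_squash_stars (pattern : String) (out : String) : Prop := out = squash_stars_alt pattern
instance (pattern : String) (out : String) : Decidable (Spec_squash_stars pattern out) := by unfold Spec_squash_stars; infer_instance

-- ===== CLAIM (what is proved, stated in full; the proofs are below) =====
def Claim_equal_squash_stars : Prop := ∀ (pattern : String), Dom_squash_stars pattern → Spec_squash_stars pattern (squash_stars pattern)

-- ===== LEMMAS AND PROOFS =====
lemma squashStarsAux_eq (l : List Char) :
    ∀ (res : List Char) (star : Bool),
      squashStarsAux l res star =
        res ++ (if star then squashGroups (l.dropWhile (· == '*')) else squashGroups l) := by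
  induction l with
  | nil => intro res star; cases star <;> simp [squashStarsAux, squashGroups]
  | cons c rest ih =>
    intro res star
    by_cases hc : c = '*'
    · subst hc
      cases star with
      | true => simp [squashStarsAux, ih, List.dropWhile]
      | false => simp [squashStarsAux, ih, squashGroups]
    · have hc' : (c == '*') = false := by simp [hc]
      cases star <;>
        simp [squashStarsAux, hc', ih, squashGroups, List.dropWhile]

-- ===== VERDICT (by name: the statement is the Claim_ definition above) =====
theorem squash_stars_spec : Claim_equal_squash_stars := by
  intro pattern _
  unfold Spec_squash_stars squash_stars squash_stars_alt
  rw [squashStarsAux_eq]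
  simp
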